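-- pv_equiv track=rewrite | github.com/Flyingfish812/Sana | backend/model/decoders/vit.py | _factorize_scale
-- ===== SOURCE A (Python) =====
-- from typing import Optional, Tuple, List
--
-- def _factorize_scale(scale: int) -> List[int]:
--     steps: List[int] = []
--     remaining = int(scale)
--     while remaining > 1:
--         if remaining % 2 == 0:
--             step = 2
--         else:
--             step = remaining
--         steps.append(step)
--         remaining //= step
--     return steps
-- ===== SOURCE B (Python) =====
-- from typing import Optional, Tuple, List
--
-- def _factorize_scale(scale: int) -> List[int]:
--     r = int(scale)
--     if r <= 1:
--         return []
--     k = (r & -r).bit_length() - 1   # number of trailing zero bits = count of factors of 2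
--     odd = r >> k
--     return [2] * k + ([odd] if odd > 1 else [])
-- ===== Notes on version B (the rewrite author's own statement) =====
-- stated objective: simpler
-- what changed: Replaces A's interleaved divide-and-append while loop by a closed-form construction: count the factors of 2 with the (r & -r).bit_length()-1 trailing-zero bit trick, then build [2]*k plus the odd remainder when it exceeds 1.
import Mathlib
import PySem

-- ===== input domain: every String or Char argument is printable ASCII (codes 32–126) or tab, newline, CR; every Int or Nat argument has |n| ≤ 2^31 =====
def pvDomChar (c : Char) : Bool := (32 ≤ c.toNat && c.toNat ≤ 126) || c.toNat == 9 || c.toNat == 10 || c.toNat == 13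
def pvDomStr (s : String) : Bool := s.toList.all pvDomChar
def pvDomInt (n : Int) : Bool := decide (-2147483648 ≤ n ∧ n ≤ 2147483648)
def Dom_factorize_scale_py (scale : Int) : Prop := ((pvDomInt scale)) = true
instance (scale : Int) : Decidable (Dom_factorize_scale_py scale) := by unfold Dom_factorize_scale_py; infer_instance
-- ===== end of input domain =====

-- B replaces A's interleaved divide-and-append loop with a closed-form construction:
-- count the factors of 2 with the (r & -r).bit_length()-1 bit trick, then build [2]*k ++ [odd].
-- Objective: simpler (no loop); not claimed faster.

-- ===== PORT A =====
-- the while loop of A: each iteration conses the chosen step and divides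
def pvLoopA (remaining : Int) : List Int :=
  if _h : 1 < remaining then
    let step : Int := if PySem.Int.mod remaining 2 = 0 then 2 else remaining
    step :: pvLoopA (PySem.Int.floordiv remaining step)
  else []
termination_by remaining.toNat
decreasing_by
  split_ifs with he
  · rw [PySem.Int.floordiv_eq_ediv_of_pos (by omega)]; omega
  · rw [PySem.Int.floordiv_eq_ediv_of_pos (by omega), Int.ediv_self (by omega)]; omega

def factorize_scale_py (scale : Int) : List Int := pvLoopA scale

-- ===== PORT B =====
-- Python 'r & -r' is Int.land (no &&& notation for Int); '.bit_length()' of a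
-- nonnegative int is Nat.size; 'r >> k' is >>>; '[2]*k' is List.replicate.
def factorize_scale_py_alt (scale : Int) : List Int :=
  if scale ≤ 1 then []
  else
    let k : Nat := (Int.land scale (-scale)).toNat.size - 1
    let odd : Int := scale >>> k
    List.replicate k 2 ++ (if 1 < odd then [odd] else [])

-- ===== PRECONDITION & SPEC =====
def Spec_factorize_scale_py (scale : Int) (out : List Int) : Prop := out = factorize_scale_py_alt scale
instance (scale : Int) (out : List Int) : Decidable (Spec_factorize_scale_py scale out) := by unfold Spec_factorize_scale_py; infer_instance

-- ===== CLAIM (what is proved, stated in full; the proofs are below) =====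
def Claim_equal_factorize_scale_py : Prop := ∀ (scale : Int), Dom_factorize_scale_py scale → Spec_factorize_scale_py scale (factorize_scale_py scale)

-- ===== LEMMAS AND PROOFS =====

-- lowest set bit, on Nat: m & -m appears as ldiff a (a-1) (see land_self_neg below)
lemma nat_ldiff_odd (a : Nat) (h1 : 1 ≤ a) (h2 : a % 2 = 1) : Nat.ldiff a (a-1) = 1 := by
  apply Nat.eq_of_testBit_eq; intro i
  rw [Nat.testBit_ldiff]
  cases i with
  | zero =>
    simp only [Nat.testBit_zero]
    have hb : (a-1) % 2 = 0 := by omega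
    simp [h2, hb]
  | succ j =>
    rw [Nat.testBit_succ, Nat.testBit_succ, Nat.testBit_succ]
    have hd : a / 2 = (a-1) / 2 := by omega
    have h1 : (1:Nat) / 2 = 0 := by norm_num
    rw [hd, h1]
    simp [Nat.zero_testBit]

lemma nat_ldiff_even (a : Nat) (h1 : 1 ≤ a) :
    Nat.ldiff (2*a) (2*a-1) = 2 * Nat.ldiff a (a-1) := by
  apply Nat.eq_of_testBit_eq; intro i
  rw [Nat.testBit_ldiff]
  cases i with
  | zero =>
    simp only [Nat.testBit_zero]
    have h2 : (2*a) % 2 = 0 := by omega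
    have h3 : (2 * Nat.ldiff a (a-1)) % 2 = 0 := by omega
    simp [h2, h3]
  | succ j =>
    rw [Nat.testBit_succ, Nat.testBit_succ, Nat.testBit_succ]
    have h2 : 2*a/2 = a := by omega
    have h3 : (2*a-1)/2 = a-1 := by omega
    have h4 : 2 * Nat.ldiff a (a-1) / 2 = Nat.ldiff a (a-1) := by omega
    rw [h2, h3, h4, ← Nat.testBit_ldiff]

lemma nat_ldiff_pos : ∀ a : Nat, 1 ≤ a → 1 ≤ Nat.ldiff a (a-1) := by
  intro a
  induction a using Nat.strong_induction_on with
  | _ a ih =>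
    intro h
    rcases Nat.even_or_odd a with he | ho
    · obtain ⟨b, hb⟩ := he
      have h2 : a = 2*b := by omega
      have hb1 : 1 ≤ b := by omega
      have hrec := ih b (by omega) hb1
      rw [h2, nat_ldiff_even b hb1]
      omega
    · rw [nat_ldiff_odd a h (Nat.odd_iff.mp ho)]

lemma land_self_neg (a : Nat) :
    Int.land (Int.ofNat (a+1)) (-(Int.ofNat (a+1))) = Int.ofNat (Nat.ldiff (a+1) a) := rfl

lemma land_self_neg' (n : Int) (h : 0 < n) :
    Int.land n (-n) = Int.ofNat (Nat.ldiff n.toNat (n.toNat - 1)) := by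
  obtain ⟨a, rfl⟩ : ∃ a : Nat, n = Int.ofNat (a+1) :=
    ⟨n.toNat - 1, by rw [show n.toNat - 1 + 1 = n.toNat by omega]; simp [Int.toNat_of_nonneg h.le]⟩
  simpa using land_self_neg a

lemma alt_le_one (n : Int) (h : n ≤ 1) : factorize_scale_py_alt n = [] := by
  simp [factorize_scale_py_alt, h]

lemma alt_odd (n : Int) (h1 : 1 < n) (h2 : n % 2 = 1) : factorize_scale_py_alt n = [n] := by
  have hn : ¬ n ≤ 1 := by omega
  have hl : Int.land n (-n) = Int.ofNat 1 := by
    rw [land_self_neg' n (by omega), nat_ldiff_odd n.toNat (by omega) (by omega)]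
  simp only [factorize_scale_py_alt, if_neg hn, hl]
  have hs : (Int.ofNat 1).toNat.size = 1 := Nat.size_one
  rw [hs]
  simp [Int.shiftRight_eq_div_pow, h1]

lemma size_two_mul (t : Nat) (h : 1 ≤ t) : (2*t).size = t.size + 1 := by
  have he : 2*t = t <<< 1 := by rw [Nat.shiftLeft_eq]; ring
  rw [he, Nat.size_shiftLeft (by omega) 1]

lemma alt_even (m : Int) (h1 : 0 < m) :
    factorize_scale_py_alt (2*m) = 2 :: factorize_scale_py_alt m := by
  have hn : ¬ (2*m ≤ 1) := by omega
  have ha : (2*m).toNat = 2 * m.toNat := by omega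
  have hm1 : 1 ≤ m.toNat := by omega
  have hl : Int.land (2*m) (-(2*m)) = Int.ofNat (2 * Nat.ldiff m.toNat (m.toNat - 1)) := by
    rw [land_self_neg' (2*m) (by omega), ha]
    rw [nat_ldiff_even m.toNat hm1]
  set t : Nat := Nat.ldiff m.toNat (m.toNat - 1) with ht
  have htp : 1 ≤ t := nat_ldiff_pos m.toNat hm1
  have hsz : (Int.ofNat (2*t)).toNat.size = t.size + 1 := by
    simpa using size_two_mul t htp
  have hszp : 1 ≤ t.size := Nat.size_pos.mpr htp
  -- the shift: (2*m) >>> (k+1) = m >>> k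
  have hshift : ∀ k : Nat, (2*m) >>> (k+1) = m >>> k := by
    intro k
    rw [Int.shiftRight_eq_div_pow, Int.shiftRight_eq_div_pow]
    push_cast
    rw [show ((2:Int))^(k+1) = 2 * 2^k by ring,
      Int.mul_ediv_mul_of_pos _ _ (by norm_num : (0:Int) < 2)]
  simp only [factorize_scale_py_alt, if_neg hn, hl, hsz]
  rw [show t.size + 1 - 1 = (t.size - 1) + 1 by omega, hshift (t.size - 1)]
  by_cases hm : m ≤ 1
  · -- m = 1: k(1) = 0, odd = 1, both sides are [2] resp. 2 :: []
    have hm1' : m = 1 := by omega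
    subst hm1'
    have ht1 : t = 1 := by rw [ht]; simpa using nat_ldiff_odd 1 le_rfl rfl
    rw [ht1]
    simp [Nat.size_one, Int.shiftRight_eq_div_pow]
  · have hl2 : Int.land m (-m) = Int.ofNat t := land_self_neg' m h1
    simp only [if_neg hm, hl2]
    have h5 : (Int.ofNat t).toNat.size = t.size := by simp
    rw [h5, List.replicate_succ, List.cons_append]

lemma loopA_eq_alt_aux : ∀ (k : Nat) (n : Int), n.toNat ≤ k → pvLoopA n = factorize_scale_py_alt n := by
  intro k
  induction k with
  | zero =>
    intro n hn
    rw [pvLoopA, dif_neg (by omega : ¬ 1 < n), alt_le_one n (by omega)]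
  | succ k ih =>
    intro n hn
    by_cases h : 1 < n
    · rw [pvLoopA, dif_pos h]
      show (if PySem.Int.mod n 2 = 0 then (2:Int) else n) ::
          pvLoopA (PySem.Int.floordiv n (if PySem.Int.mod n 2 = 0 then (2:Int) else n)) = _
      by_cases he : PySem.Int.mod n 2 = 0
      · rw [if_pos he]
        obtain ⟨m, hm⟩ := (PySem.Int.mod_eq_zero_iff_dvd n 2).mp he
        have hfd : PySem.Int.floordiv n 2 = m := by
          rw [PySem.Int.floordiv_eq_ediv_of_pos (by norm_num), hm,
            Int.mul_ediv_cancel_left _ (by norm_num)]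
        rw [hfd, ih m (by omega), hm, alt_even m (by omega)]
      · rw [if_neg he]
        have hmod : n % 2 = 1 := by
          have := PySem.Int.mod_eq_emod_of_pos (by norm_num : (0:Int) < 2) (a := n)
          omega
        have hfd : PySem.Int.floordiv n n = 1 := by
          rw [PySem.Int.floordiv_eq_ediv_of_pos (by omega), Int.ediv_self (by omega)]
        have hL1 : pvLoopA 1 = [] := by rw [pvLoopA]; norm_num
        rw [hfd, hL1, alt_odd n h hmod]
    · rw [pvLoopA, dif_neg h, alt_le_one n (by omega)]

lemma loopA_eq_alt (n : Int) : pvLoopA n = factorize_scale_py_alt n :=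
  loopA_eq_alt_aux n.toNat n le_rfl

-- ===== VERDICT (by name: the statement is the Claim_ definition above) =====
theorem factorize_scale_py_spec : Claim_equal_factorize_scale_py := by
  intro scale _
  unfold Spec_factorize_scale_py factorize_scale_py
  exact loopA_eq_alt scale
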